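-- pv_equiv track=rewrite | github.com/tinaba96/Coding | acode/abc238/c/main.py | f
-- ===== SOURCE A (Python) =====
-- def f(x):
--     k = len(str(x))
--     m = ''
--     if k >= 2:
--         for i in range(k-1):
--             m += '9'
--         m = int(m)
--     else:
--         m = 0
--
--     val = x - m
--     return val
-- ===== SOURCE B (Python) =====
-- def f(x):
--     k = len(str(x))
--     return x - (10 ** (k - 1) - 1)
-- ===== Notes on version B (the rewrite author's own statement) =====
-- stated objective: simpler
-- what changed: Replaces the digit-by-digit string-building loop, the int() parse and the length branch with a single closed-form arithmetic expression that subtracts the run of k-1 nines computed as a power of ten minus one.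
import Mathlib
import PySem

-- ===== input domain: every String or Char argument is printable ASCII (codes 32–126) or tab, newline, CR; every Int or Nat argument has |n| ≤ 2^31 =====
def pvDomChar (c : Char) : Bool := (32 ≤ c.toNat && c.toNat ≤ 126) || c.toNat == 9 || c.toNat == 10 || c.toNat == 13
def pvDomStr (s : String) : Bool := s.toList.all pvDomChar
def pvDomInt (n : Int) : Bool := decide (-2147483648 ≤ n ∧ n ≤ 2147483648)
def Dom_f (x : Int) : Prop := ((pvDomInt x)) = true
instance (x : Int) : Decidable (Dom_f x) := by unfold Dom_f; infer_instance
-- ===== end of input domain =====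

-- B replaces A's string-building loop and branch by the closed form x - (10^(k-1) - 1); objective: simpler.

-- ===== PORT A =====
-- int(m) is applied to a non-empty string of '9's, so it never raises; .getD 0 is unreachable.
def f (x : Int) : Int :=
  let k : Int := PySem.Str.len (PySem.Int.toStr x)
  let m : Int :=
    if k ≥ 2 then
      let s : String := (PySem.List.pyRange 0 (k - 1) 1).foldl (fun s _ => s ++ "9") ""
      (PySem.Int.ofStr? s).getD 0
    else 0
  x - m

-- ===== PORT B =====
def f_alt (x : Int) : Int :=
  let k : Int := PySem.Str.len (PySem.Int.toStr x)
  x - (10 ^ (k - 1).toNat - 1)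

-- ===== PRECONDITION & SPEC =====
def Spec_f (x : Int) (out : Int) : Prop := out = f_alt x
instance (x : Int) (out : Int) : Decidable (Spec_f x out) := by unfold Spec_f; infer_instance

-- ===== CLAIM (what is proved, stated in full; the proofs are below) =====
def Claim_equal_f : Prop := ∀ (x : Int), Dom_f x → Spec_f x (f x)

-- ===== LEMMAS AND PROOFS =====

lemma toDigitsCore_len_ge (b f n : Nat) (l : List Char) :
    l.length ≤ (Nat.toDigitsCore b f n l).length := by
  induction f generalizing n l with
  | zero => simp [Nat.toDigitsCore]
  | succ f ih =>
    simp only [Nat.toDigitsCore]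
    split
    · simp
    · exact le_trans (by simp) (ih _ _)

lemma toDigits_len_pos (n : Nat) : 1 ≤ (Nat.toDigits 10 n).length := by
  unfold Nat.toDigits
  simp only [Nat.toDigitsCore]
  split
  · simp
  · exact le_trans (by simp) (toDigitsCore_len_ge _ _ _ _)

lemma toChars_len_bounds (x : Int) (h : -2147483648 ≤ x ∧ x ≤ 2147483648) :
    1 ≤ (PySem.Int.toChars x).length ∧ (PySem.Int.toChars x).length ≤ 11 := by
  unfold PySem.Int.toChars
  split
  · have h10 : x.natAbs < 10 ^ 10 := by omega
    have := Nat.toDigits_length 10 x.natAbs 10 (by norm_num) h10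
    have := toDigits_len_pos x.natAbs
    exact ⟨by simp, by simp; omega⟩
  · have h10 : x.toNat < 10 ^ 10 := by omega
    have := Nat.toDigits_length 10 x.toNat 10 (by norm_num) h10
    have := toDigits_len_pos x.toNat
    constructor <;> omega

lemma len_toStr (x : Int) :
    PySem.Str.len (PySem.Int.toStr x) = ((PySem.Int.toChars x).length : Int) := by
  simp [PySem.Str.len_eq, PySem.Int.toStr]

-- ===== VERDICT (by name: the statement is the Claim_ definition above) =====
theorem f_spec : Claim_equal_f := by
  intro x hd
  unfold Spec_f f f_alt
  rw [len_toStr]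
  have hb := toChars_len_bounds x (by unfold Dom_f pvDomInt at hd; simpa using of_decide_eq_true hd)
  obtain ⟨h1, h2⟩ := hb
  set L := (PySem.Int.toChars x).length with hL
  clear_value L
  interval_cases L <;>
    · show x - _ = x - _
      congr 1
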